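-- pv_equiv track=rewrite | github.com/Fredomme/analyse-et-pr-diction-du-k-no-de-la-FDJ | main.py | time_based_split_cv
-- ===== SOURCE A (Python) =====
-- def time_based_split_cv(X, n_folds=3):
--     """
--     Exemple simplifié de création de splits temporels.
--     Divise chronologiquement X en n_folds segments successifs.
--     """
--     folds = []
--     fold_size = len(X) // n_folds
--     for i in range(n_folds):
--         start_val = i * fold_size
--         end_val = (i+1) * fold_size if i < n_folds - 1 else len(X)
--         # train => [0 .. start_val-1], val => [start_val .. end_val-1]
--         train_idx = list(range(0, start_val))
--         val_idx = list(range(start_val, end_val))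
--         folds.append((train_idx, val_idx))
--     return folds
-- ===== SOURCE B (Python) =====
-- def time_based_split_cv(X, n_folds=3):
--     # Peel validation segments off the END of one materialized index list,
--     # building the folds in reverse, then reverse the result.
--     fold_size = len(X) // n_folds
--     rev = []
--     rest = list(range(len(X)))
--     for k in range(n_folds, 0, -1):
--         cut = (k - 1) * fold_size
--         rev.append((rest[:cut], rest[cut:]))
--         rest = rest[:cut]
--     rev.reverse()
--     return rev
-- ===== Notes on version B (the rewrite author's own statement) =====
-- stated objective: alternative
-- what changed: B materializes the full index list once and peels validation segments off its end by slicing, iterating fold numbers downward and reversing the collected folds at the end, instead of A's forward loop that generates each fold's train and validation ranges from scratch.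
import Mathlib
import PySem

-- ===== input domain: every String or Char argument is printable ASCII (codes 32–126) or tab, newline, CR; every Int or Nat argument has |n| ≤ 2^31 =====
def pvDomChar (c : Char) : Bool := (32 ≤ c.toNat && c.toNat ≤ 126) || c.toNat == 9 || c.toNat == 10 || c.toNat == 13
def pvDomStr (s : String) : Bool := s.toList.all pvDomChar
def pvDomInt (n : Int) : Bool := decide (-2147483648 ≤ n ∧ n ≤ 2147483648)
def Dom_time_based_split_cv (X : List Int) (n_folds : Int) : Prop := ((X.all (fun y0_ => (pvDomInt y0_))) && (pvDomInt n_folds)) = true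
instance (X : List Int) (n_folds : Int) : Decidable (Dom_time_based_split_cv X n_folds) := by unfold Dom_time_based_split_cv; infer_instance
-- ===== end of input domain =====

-- B materializes the index list once and peels validation segments off its end by slicing,
-- building the folds backwards and reversing at the end (objective: alternative).

-- ===== PORT A =====
def time_based_split_cv (X : List Int) (n_folds : Int) : List (List Int × List Int) :=
  let fold_size := PySem.Int.floordiv (X.length : Int) n_folds
  (PySem.List.pyRange 0 n_folds 1).foldl
    (fun folds i =>
      let start_val := i * fold_size
      let end_val := if i < n_folds - 1 then (i + 1) * fold_size else (X.length : Int)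
      let train_idx := PySem.List.pyRange 0 start_val 1
      let val_idx := PySem.List.pyRange start_val end_val 1
      folds ++ [(train_idx, val_idx)]) []

-- ===== PORT B =====
def time_based_split_cv_alt (X : List Int) (n_folds : Int) : List (List Int × List Int) :=
  let fold_size := PySem.Int.floordiv (X.length : Int) n_folds
  let st := (PySem.List.pyRange n_folds 0 (-1)).foldl
    (fun (st : List (List Int × List Int) × List Int) k =>
      let cut := (k - 1) * fold_size
      (st.1 ++ [(PySem.List.slice st.2 none (some cut), PySem.List.slice st.2 (some cut) none)],
       PySem.List.slice st.2 none (some cut)))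
    ([], PySem.List.pyRange 0 (X.length : Int) 1)
  st.1.reverse

-- ===== PRECONDITION & SPEC =====
-- Pre_ excludes exactly n_folds = 0, where Python's len(X) // n_folds raises ZeroDivisionError in both A and B.
def Pre_time_based_split_cv (X : List Int) (n_folds : Int) : Prop := n_folds ≠ 0
instance (X : List Int) (n_folds : Int) : Decidable (Pre_time_based_split_cv X n_folds) := by unfold Pre_time_based_split_cv; infer_instance
def pvWitness_time_based_split_cv : List Int × Int := ([10, 20, 30, 40, 50, 60, 70], 3)

def Spec_time_based_split_cv (X : List Int) (n_folds : Int) (out : List (List Int × List Int)) : Prop := out = time_based_split_cv_alt X n_folds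
instance (X : List Int) (n_folds : Int) (out : List (List Int × List Int)) : Decidable (Spec_time_based_split_cv X n_folds out) := by unfold Spec_time_based_split_cv; infer_instance

-- ===== CLAIM (what is proved, stated in full; the proofs are below) =====
def Claim_equal_time_based_split_cv : Prop := ∀ (X : List Int) (n_folds : Int), Dom_time_based_split_cv X n_folds → Pre_time_based_split_cv X n_folds → Spec_time_based_split_cv X n_folds (time_based_split_cv X n_folds)

-- ===== LEMMAS AND PROOFS =====

-- Appending folds one at a time is mapping over the loop's range.
lemma foldl_app_map {α β : Type} (f : α → β) :
    ∀ (l : List α) (acc : List β), l.foldl (fun a i => a ++ [f i]) acc = acc ++ l.map f := by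
  intro l
  induction l with
  | nil => intro acc; simp
  | cons x xs ih => intro acc; simp [List.foldl_cons, ih]

-- Slicing a 0-based range at an interior point yields the two subranges.
lemma slice_to_pyRange (e c : Int) (h0 : 0 ≤ c) (h : c ≤ e) :
    PySem.List.slice (PySem.List.pyRange 0 e 1) none (some c) = PySem.List.pyRange 0 c 1 := by
  rw [PySem.List.slice_to _ h0,
      PySem.List.pyRange_one_append 0 c e h0 h]
  have hl : (PySem.List.pyRange 0 c 1).length = c.toNat := by
    simp [PySem.List.length_pyRange_one]
  rw [← hl, List.take_left]

lemma slice_from_pyRange (e c : Int) (h0 : 0 ≤ c) (h : c ≤ e) :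
    PySem.List.slice (PySem.List.pyRange 0 e 1) (some c) none = PySem.List.pyRange c e 1 := by
  rw [PySem.List.slice_from _ h0,
      PySem.List.pyRange_one_append 0 c e h0 h]
  have hl : (PySem.List.pyRange 0 c 1).length = c.toNat := by
    simp [PySem.List.length_pyRange_one]
  rw [← hl, List.drop_left]

-- Loop invariant for B: counting k down from j with rest = range(0, j*fs), the collected
-- reversed folds are exactly the first j expanding-window folds, reversed.
lemma split_loop_b (fs : Int) (hfs : 0 ≤ fs) :
    ∀ (m : Nat) (j : Int), j ≤ m → 0 ≤ j → ∀ (rev : List (List Int × List Int)),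
    ((PySem.List.pyRange j 0 (-1)).foldl
      (fun (st : List (List Int × List Int) × List Int) k =>
        let cut := (k - 1) * fs
        (st.1 ++ [(PySem.List.slice st.2 none (some cut), PySem.List.slice st.2 (some cut) none)],
         PySem.List.slice st.2 none (some cut)))
      (rev, PySem.List.pyRange 0 (j * fs) 1)).1
    = rev ++ ((PySem.List.pyRange 0 j 1).map
        (fun i => (PySem.List.pyRange 0 (i * fs) 1,
                   PySem.List.pyRange (i * fs) ((i + 1) * fs) 1))).reverse := by
  intro m
  induction m with
  | zero =>
    intro j hj hj0 rev
    have hje : j = 0 := by omega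
    subst hje
    rw [PySem.List.pyRange_neg_one_eq_nil le_rfl, PySem.List.pyRange_one_eq_nil le_rfl]
    simp
  | succ m ih =>
    intro j hj hj0 rev
    by_cases hj1 : j ≤ 0
    · have hje : j = 0 := by omega
      subst hje
      rw [PySem.List.pyRange_neg_one_eq_nil le_rfl, PySem.List.pyRange_one_eq_nil le_rfl]
      simp
    · replace hj1 : 0 < j := by omega
      rw [PySem.List.pyRange_neg_one_cons hj1]
      simp only [List.foldl_cons]
      have h0 : 0 ≤ (j - 1) * fs := mul_nonneg (by omega) hfs
      have hle : (j - 1) * fs ≤ j * fs := by nlinarith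
      rw [slice_to_pyRange _ _ h0 hle, slice_from_pyRange _ _ h0 hle]
      have := ih (j - 1) (by omega) (by omega)
        (rev ++ [(PySem.List.pyRange 0 ((j - 1) * fs) 1,
                  PySem.List.pyRange ((j - 1) * fs) (j * fs) 1)])
      have hj' : j - 1 + 1 = j := by omega
      rw [this]
      have hsplit : PySem.List.pyRange 0 j 1
          = PySem.List.pyRange 0 (j - 1) 1 ++ [j - 1] := by
        have := PySem.List.pyRange_one_succ_right (a := 0) (b := j - 1) (by omega)
        rw [hj'] at this; exact this
      rw [hsplit]
      simp [hj', List.append_assoc]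

-- The main equality, stated over an arbitrary length L and fold size fs.
lemma split_main (L n : Int) (hn : 0 < n) (fs : Int) (hfs : 0 ≤ fs) (hnfsL : n * fs ≤ L) :
    (PySem.List.pyRange 0 n 1).foldl
      (fun folds i =>
        folds ++ [(PySem.List.pyRange 0 (i * fs) 1,
                   PySem.List.pyRange (i * fs) (if i < n - 1 then (i + 1) * fs else L) 1)]) []
    = ((PySem.List.pyRange n 0 (-1)).foldl
        (fun (st : List (List Int × List Int) × List Int) k =>
          let cut := (k - 1) * fs
          (st.1 ++ [(PySem.List.slice st.2 none (some cut), PySem.List.slice st.2 (some cut) none)],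
           PySem.List.slice st.2 none (some cut)))
        ([], PySem.List.pyRange 0 L 1)).1.reverse := by
  have hL0 : (0:Int) ≤ L := le_trans (mul_nonneg hn.le hfs) hnfsL
  have hcut0 : 0 ≤ (n - 1) * fs := mul_nonneg (by omega) hfs
  have hcutL : (n - 1) * fs ≤ L := le_trans (by nlinarith) hnfsL
  -- A side: the appending foldl is a map
  rw [foldl_app_map]
  -- B side: unroll the first (k = n) iteration, then apply the loop invariant
  rw [PySem.List.pyRange_neg_one_cons hn]
  simp only [List.foldl_cons]
  rw [slice_to_pyRange _ _ hcut0 hcutL, slice_from_pyRange _ _ hcut0 hcutL]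
  rw [split_loop_b fs hfs (n - 1).toNat (n - 1) (by omega) (by omega)]
  -- both sides: split range(0, n) at n - 1
  have hsplit : PySem.List.pyRange 0 n 1 = PySem.List.pyRange 0 (n - 1) 1 ++ [n - 1] := by
    have h := PySem.List.pyRange_one_succ_right (a := 0) (b := n - 1) (by omega)
    have he : n - 1 + 1 = n := by omega
    rw [he] at h; exact h
  rw [hsplit, List.map_append, List.nil_append]
  have hcong : (PySem.List.pyRange 0 (n - 1) 1).map
      (fun i => (PySem.List.pyRange 0 (i * fs) 1,
                 PySem.List.pyRange (i * fs)
                   (if i < n - 1 then (i + 1) * fs else L) 1))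
      = (PySem.List.pyRange 0 (n - 1) 1).map
      (fun i => (PySem.List.pyRange 0 (i * fs) 1,
                 PySem.List.pyRange (i * fs) ((i + 1) * fs) 1)) := by
    apply List.map_congr_left
    intro i hi
    have hmem := (PySem.List.mem_pyRange_one).1 hi
    rw [if_pos hmem.2]
  simp only [List.map_cons, List.map_nil]
  rw [hcong]
  rw [if_neg (lt_irrefl (n - 1))]
  simp

-- ===== VERDICT (by name: the statement is the Claim_ definition above) =====
theorem time_based_split_cv_spec : Claim_equal_time_based_split_cv := by
  intro X n hdom hpre
  unfold Spec_time_based_split_cv time_based_split_cv time_based_split_cv_alt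
  by_cases hn : 0 < n
  · have hfse : PySem.Int.floordiv (X.length : Int) n = (X.length : Int) / n :=
      PySem.Int.floordiv_eq_ediv_of_pos hn
    have hfs0 : 0 ≤ PySem.Int.floordiv (X.length : Int) n := by
      rw [hfse]; exact Int.ediv_nonneg (Int.natCast_nonneg _) hn.le
    have hnfsL : n * PySem.Int.floordiv (X.length : Int) n ≤ (X.length : Int) := by
      rw [hfse, mul_comm]; exact Int.ediv_mul_le _ (ne_of_gt hn)
    exact split_main (X.length : Int) n hn _ hfs0 hnfsL
  · have hn' : n ≤ 0 := by omega
    rw [PySem.List.pyRange_one_eq_nil hn', PySem.List.pyRange_neg_one_eq_nil hn']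
    simp
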